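-- pv_equiv track=rewrite | github.com/RomanRudin/bfu_discrete_math_labs | Lab2/ex5.py | count_restricted_paths
-- ===== SOURCE A (Python) =====
-- def count_restricted_paths(horizontal_steps: int, vertical_steps: int) -> int:
--     dp = [[[0, 0] for _ in range(vertical_steps + 1)] for _ in range(horizontal_steps + 1)]
--     dp[0][0][0] = 1
--     for h in range(horizontal_steps + 1):
--         for v in range(vertical_steps + 1):
--             if h == 0 and v == 0:
--                 continue
--             if h > 0:
--                 dp[h][v][0] = dp[h-1][v][0] + dp[h-1][v][1]
--             if v > 0:
--                 dp[h][v][1] = dp[h][v-1][0]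
--
--     return dp[horizontal_steps][vertical_steps][0] + dp[horizontal_steps][vertical_steps][1]
-- ===== SOURCE B (Python) =====
-- def count_restricted_paths(horizontal_steps: int, vertical_steps: int) -> int:
--     # closed form: C(horizontal_steps + 1, vertical_steps)
--     n = horizontal_steps + 1
--     if vertical_steps < 0 or vertical_steps > n:
--         return 0
--     r = 1
--     for i in range(vertical_steps):
--         r = r * (n - i) // (i + 1)
--     return r
-- ===== Notes on version B (the rewrite author's own statement) =====
-- stated objective: faster
-- what changed: Replaces the O(h*v) two-state DP table by the closed-form binomial coefficient C(h+1, v), computed with one multiplicative loop of v exact-division steps.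
-- crash fix: On any input with a negative argument A raises IndexError (its dp table indexing fails); B returns 0, the number of such paths. — e.g. on count_restricted_paths(-1, 2): A raises IndexError, B returns 0
import Mathlib
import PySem

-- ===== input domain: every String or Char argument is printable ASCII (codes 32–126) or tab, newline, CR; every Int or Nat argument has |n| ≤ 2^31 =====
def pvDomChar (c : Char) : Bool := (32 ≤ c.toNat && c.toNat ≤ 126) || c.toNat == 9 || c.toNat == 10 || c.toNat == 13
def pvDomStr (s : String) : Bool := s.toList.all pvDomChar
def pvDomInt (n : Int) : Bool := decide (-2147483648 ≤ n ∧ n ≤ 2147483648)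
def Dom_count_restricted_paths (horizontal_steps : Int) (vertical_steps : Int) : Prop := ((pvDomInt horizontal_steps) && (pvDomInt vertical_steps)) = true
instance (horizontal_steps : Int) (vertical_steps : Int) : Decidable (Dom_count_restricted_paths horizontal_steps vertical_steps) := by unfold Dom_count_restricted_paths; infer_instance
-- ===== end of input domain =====

-- B replaces A's dynamic-programming table by the closed-form binomial coefficient
-- C(h+1, v), computed with a single multiplicative loop over v factors.

-- ===== PORT A =====
-- dp[i][j] is a two-element Python list [x, y]; ported as the pair (x, y).
def pvGet2 (dp : Array (Array (Int × Int))) (i j : Nat) : Int × Int :=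
  (dp.getD i #[]).getD j (0, 0)

def pvSet2 (dp : Array (Array (Int × Int))) (i j : Nat) (p : Int × Int) : Array (Array (Int × Int)) :=
  dp.modify i (fun row => row.setIfInBounds j p)

-- 'if h > 0: dp[h][v][0] = dp[h-1][v][0] + dp[h-1][v][1]'
def pvStepH (dp : Array (Array (Int × Int))) (h v : Int) : Array (Array (Int × Int)) :=
  if 0 < h then
    pvSet2 dp h.toNat v.toNat
      ((pvGet2 dp (h - 1).toNat v.toNat).1 + (pvGet2 dp (h - 1).toNat v.toNat).2,
       (pvGet2 dp h.toNat v.toNat).2)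
  else dp

-- 'if v > 0: dp[h][v][1] = dp[h][v-1][0]'
def pvStepV (dp : Array (Array (Int × Int))) (h v : Int) : Array (Array (Int × Int)) :=
  if 0 < v then
    pvSet2 dp h.toNat v.toNat
      ((pvGet2 dp h.toNat v.toNat).1, (pvGet2 dp h.toNat (v - 1).toNat).1)
  else dp

-- one iteration of the inner loop body (A's three ifs, in order)
def pvCellStep (dp : Array (Array (Int × Int))) (h v : Int) : Array (Array (Int × Int)) :=
  if h = 0 ∧ v = 0 then dp
  else pvStepV (pvStepH dp h v) h v

def count_restricted_paths (horizontal_steps : Int) (vertical_steps : Int) : Int :=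
  let dp0 : Array (Array (Int × Int)) :=
    Array.replicate (horizontal_steps + 1).toNat
      (Array.replicate (vertical_steps + 1).toNat ((0 : Int), (0 : Int)))
  let dpInit := pvSet2 dp0 0 0 (1, 0)
  let dp := (PySem.List.pyRange 0 (horizontal_steps + 1) 1).foldl (fun dp h =>
      (PySem.List.pyRange 0 (vertical_steps + 1) 1).foldl (fun dp v => pvCellStep dp h v) dp)
    dpInit
  (pvGet2 dp horizontal_steps.toNat vertical_steps.toNat).1 +
    (pvGet2 dp horizontal_steps.toNat vertical_steps.toNat).2

-- ===== PORT B =====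
def count_restricted_paths_alt (horizontal_steps : Int) (vertical_steps : Int) : Int :=
  let n := horizontal_steps + 1
  if vertical_steps < 0 ∨ n < vertical_steps then 0
  else
    (PySem.List.pyRange 0 vertical_steps 1).foldl
      (fun r i => PySem.Int.floordiv (r * (n - i)) (i + 1)) 1

-- ===== PRECONDITION & SPEC =====
-- A indexes its dp table with the inputs, so it raises IndexError whenever either argument is negative.
def Pre_count_restricted_paths (horizontal_steps : Int) (vertical_steps : Int) : Prop :=
  0 ≤ horizontal_steps ∧ 0 ≤ vertical_steps
instance (horizontal_steps : Int) (vertical_steps : Int) : Decidable (Pre_count_restricted_paths horizontal_steps vertical_steps) := by unfold Pre_count_restricted_paths; infer_instance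

def pvWitness_count_restricted_paths : Int × Int := (3, 2)

-- On any input with a negative argument A raises IndexError while B returns the path count 0.
def Raises_count_restricted_paths (horizontal_steps : Int) (vertical_steps : Int) : Prop :=
  horizontal_steps < 0 ∨ vertical_steps < 0
instance (horizontal_steps : Int) (vertical_steps : Int) : Decidable (Raises_count_restricted_paths horizontal_steps vertical_steps) := by unfold Raises_count_restricted_paths; infer_instance
def pvRaiseWitness_count_restricted_paths : Int × Int := (-1, 2)
def pvRaiseWitnessOut_count_restricted_paths : Int := 0

def Spec_count_restricted_paths (horizontal_steps : Int) (vertical_steps : Int) (out : Int) : Prop := out = count_restricted_paths_alt horizontal_steps vertical_steps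
instance (horizontal_steps : Int) (vertical_steps : Int) (out : Int) : Decidable (Spec_count_restricted_paths horizontal_steps vertical_steps out) := by unfold Spec_count_restricted_paths; infer_instance

-- ===== CLAIM (what is proved, stated in full; the proofs are below) =====
def Claim_equal_count_restricted_paths : Prop := ∀ (horizontal_steps : Int) (vertical_steps : Int), Dom_count_restricted_paths horizontal_steps vertical_steps → Pre_count_restricted_paths horizontal_steps vertical_steps → Spec_count_restricted_paths horizontal_steps vertical_steps (count_restricted_paths horizontal_steps vertical_steps)

def Claim_raises_count_restricted_paths : Prop := (∀ (horizontal_steps : Int) (vertical_steps : Int), Dom_count_restricted_paths horizontal_steps vertical_steps → Raises_count_restricted_paths horizontal_steps vertical_steps → ¬ Pre_count_restricted_paths horizontal_steps vertical_steps) ∧ (Dom_count_restricted_paths (pvRaiseWitness_count_restricted_paths.1) (pvRaiseWitness_count_restricted_paths.2) ∧ Raises_count_restricted_paths (pvRaiseWitness_count_restricted_paths.1) (pvRaiseWitness_count_restricted_paths.2) ∧ count_restricted_paths_alt (pvRaiseWitness_count_restricted_paths.1) (pvRaiseWitness_count_restricted_paths.2) = pvRaiseWitnessOut_count_restricted_p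aths)

-- ===== LEMMAS AND PROOFS =====

-- the binomial coefficient, as an Int
def pvCh (n k : Nat) : Int := (n.choose k : Int)

-- the final content of A's cell dp[i][j]
def pvCell (i j : Nat) : Int × Int := (pvCh i j, if j = 0 then 0 else pvCh i (j - 1))

theorem pvRow_modify (dp : Array (Array (Int × Int))) (i i' : Nat)
    (f : Array (Int × Int) → Array (Int × Int)) :
    (dp.modify i f).getD i' #[] =
      if i' = i ∧ i < dp.size then f (dp.getD i #[]) else dp.getD i' #[] := by
  rw [Array.getD_eq_getD_getElem?, Array.getD_eq_getD_getElem?, Array.getElem?_modify]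
  rcases eq_or_ne i' i with rfl | h1
  · rcases Nat.lt_or_ge i' dp.size with h2 | h2
    · simp [h2]
    · simp [Nat.not_lt.2 h2, Array.getD_eq_getD_getElem?]
  · rw [if_neg (fun h => h1 h.symm), if_neg (fun h => h1 h.1), Array.getD_eq_getD_getElem?]

theorem pvElt_set (row : Array (Int × Int)) (j j' : Nat) (p : Int × Int) :
    (row.setIfInBounds j p).getD j' (0, 0) =
      if j' = j ∧ j < row.size then p else row.getD j' (0, 0) := by
  rw [Array.getD_eq_getD_getElem?, Array.getD_eq_getD_getElem?, Array.getElem?_setIfInBounds]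
  split_ifs <;> simp_all

theorem pvGetD_replicate {α : Type} (x d : α) (T i : Nat) :
    (Array.replicate T x).getD i d = if i < T then x else d := by
  rw [Array.getD_eq_getD_getElem?, Array.getElem?_replicate]
  split_ifs <;> simp_all

-- Pascal's rule, shaped as it appears in A's table
theorem pvPascal (h c : Nat) (hh : 0 < h) :
    pvCh (h - 1) c + (if c = 0 then 0 else pvCh (h - 1) (c - 1)) = pvCh h c := by
  obtain ⟨h', rfl⟩ : ∃ h', h = h' + 1 := ⟨h - 1, by omega⟩
  cases c with
  | zero => simp [pvCh]
  | succ c => simp [pvCh, Nat.choose_succ_succ h' c]; ring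

-- invariant: table is T × U; rows < r are final, row r is final up to column c, the rest untouched
def pvDone (T U r c : Nat) (dp : Array (Array (Int × Int))) : Prop :=
  dp.size = T ∧ (∀ i, (dp.getD i #[]).size = if i < T then U else 0) ∧
  ∀ i j, i < T → j < U →
    pvGet2 dp i j =
      if i < r ∨ (i = r ∧ j < c) then pvCell i j
      else if i = 0 ∧ j = 0 then (1, 0) else (0, 0)

theorem pvSet2_length (dp : Array (Array (Int × Int))) (i j : Nat) (p : Int × Int) :
    (pvSet2 dp i j p).size = dp.size := by
  simp [pvSet2]

theorem pvSet2_rowlen (dp : Array (Array (Int × Int))) (i j : Nat) (p : Int × Int) (i' : Nat) :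
    ((pvSet2 dp i j p).getD i' #[]).size = (dp.getD i' #[]).size := by
  unfold pvSet2
  rw [pvRow_modify]
  split_ifs with h
  · rw [h.1]; simp
  · rfl

theorem pvGet2_set2_ne (dp : Array (Array (Int × Int))) (i j i' j' : Nat) (p : Int × Int)
    (h : ¬ (i' = i ∧ j' = j)) :
    pvGet2 (pvSet2 dp i j p) i' j' = pvGet2 dp i' j' := by
  unfold pvGet2 pvSet2
  rw [pvRow_modify]
  split_ifs with hc
  · rw [hc.1, pvElt_set, if_neg (fun hj => h ⟨hc.1, hj.1⟩)]
  · rfl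

theorem pvGet2_set2_self (dp : Array (Array (Int × Int))) (i j : Nat) (p : Int × Int)
    (hi : i < dp.size) (hj : j < (dp.getD i #[]).size) :
    pvGet2 (pvSet2 dp i j p) i j = p := by
  unfold pvGet2 pvSet2
  rw [pvRow_modify, if_pos ⟨rfl, hi⟩, pvElt_set, if_pos ⟨rfl, hj⟩]

theorem pvDone_init (T U : Nat) (hT : 0 < T) (hU : 0 < U) :
    pvDone T U 0 0 (pvSet2 (Array.replicate T (Array.replicate U ((0:Int),(0:Int)))) 0 0 (1, 0)) := by
  refine ⟨by simp [pvSet2], ?_, ?_⟩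
  · intro i
    rw [pvSet2, pvRow_modify, pvGetD_replicate]
    split_ifs <;> simp_all
  · intro i j hi hj
    unfold pvGet2 pvSet2
    rw [pvRow_modify]
    rcases eq_or_ne i 0 with rfl | hi0
    · rw [if_pos ⟨rfl, by simpa using hT⟩, pvGetD_replicate, if_pos hT, pvElt_set,
        Array.size_replicate]
      rcases eq_or_ne j 0 with rfl | hj0
      · rw [if_pos ⟨rfl, hU⟩]
        simp
      · rw [if_neg (by tauto), pvGetD_replicate, if_pos hj]
        simp [hj0]
    · rw [if_neg (by tauto), pvGetD_replicate, if_pos hi, pvGetD_replicate, if_pos hj]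
      simp [hi0]

-- updating cell (r, c) to its final value advances the invariant by one cell
theorem pvDone_of_set (T U r c : Nat) (hr : r < T) (hc : c < U)
    (dpOld dpNew : Array (Array (Int × Int))) (hOld : pvDone T U r c dpOld)
    (hlen : dpNew.size = dpOld.size)
    (hrowlen : ∀ i, (dpNew.getD i #[]).size = (dpOld.getD i #[]).size)
    (hsame : ∀ i j, ¬ (i = r ∧ j = c) → pvGet2 dpNew i j = pvGet2 dpOld i j)
    (hnew : pvGet2 dpNew r c = pvCell r c) :
    pvDone T U r (c + 1) dpNew := by
  obtain ⟨h1, h2, h3⟩ := hOld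
  refine ⟨hlen.trans h1, fun i => (hrowlen i).trans (h2 i), ?_⟩
  intro i j hi hj
  by_cases hij : i = r ∧ j = c
  · obtain ⟨rfl, rfl⟩ := hij
    rw [hnew, if_pos (Or.inr ⟨rfl, by omega⟩)]
  · rw [hsame i j hij, h3 i j hi hj]
    by_cases hcond : i < r ∨ (i = r ∧ j < c)
    · rw [if_pos hcond, if_pos (by omega)]
    · rw [if_neg hcond]
      have hnc : ¬ (i < r ∨ i = r ∧ j < c + 1) := by omega
      rw [if_neg hnc]

theorem pvDone_step (T U r c : Nat) (dp : Array (Array (Int × Int)))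
    (hd : pvDone T U r c dp) (hr : r < T) (hc : c < U) :
    pvDone T U r (c + 1) (pvCellStep dp (r : Int) (c : Int)) := by
  obtain ⟨hlen, hrows, hget⟩ := hd
  have hrowr : (dp.getD r #[]).size = U := by rw [hrows, if_pos hr]
  have e0 : ((r : Int)).toNat = r := by omega
  have e1 : ((c : Int)).toNat = c := by omega
  have e2 : ((r : Int) - 1).toNat = r - 1 := by omega
  have e3 : ((c : Int) - 1).toNat = c - 1 := by omega
  unfold pvCellStep
  by_cases h00 : (r : Int) = 0 ∧ (c : Int) = 0
  · rw [if_pos h00]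
    have hr0 : r = 0 := by omega
    have hc0 : c = 0 := by omega
    subst hr0; subst hc0
    refine pvDone_of_set T U 0 0 hr hc dp dp ⟨hlen, hrows, hget⟩ rfl (fun _ => rfl)
      (fun _ _ _ => rfl) ?_
    rw [hget 0 0 hr hc, if_neg (by omega)]
    simp [pvCell, pvCh]
  · rw [if_neg h00]
    by_cases hr0 : 0 < r
    · -- the 'h > 0' write fires
      have hA := hget (r - 1) c (by omega) hc
      rw [if_pos (Or.inl (by omega))] at hA
      have hB := hget r c hr hc
      rw [if_neg (by omega), if_neg (by omega)] at hB
      have hd1 : pvStepH dp (r : Int) (c : Int) =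
          pvSet2 dp r c ((pvCell (r - 1) c).1 + (pvCell (r - 1) c).2, 0) := by
        unfold pvStepH
        rw [if_pos (by exact_mod_cast hr0), e0, e1, e2, hA, hB]
      have hbr : r < dp.size := by omega
      have hbc : c < (dp.getD r #[]).size := by omega
      have hget1self : pvGet2 (pvStepH dp (r : Int) (c : Int)) r c = (pvCh r c, 0) := by
        rw [hd1, pvGet2_set2_self dp r c _ hbr hbc]
        have hp := pvPascal r c hr0
        simp only [pvCell] at hp ⊢
        rw [hp]
      by_cases hc0 : 0 < c
      · have hC := hget r (c - 1) hr (by omega)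
        rw [if_pos (Or.inr ⟨rfl, by omega⟩)] at hC
        have hget1C : pvGet2 (pvStepH dp (r : Int) (c : Int)) r (c - 1) = pvCell r (c - 1) := by
          rw [hd1, pvGet2_set2_ne dp r c r (c - 1) _ (by omega), hC]
        have hd2 : pvStepV (pvStepH dp (r : Int) (c : Int)) (r : Int) (c : Int) =
            pvSet2 (pvStepH dp (r : Int) (c : Int)) r c (pvCh r c, pvCh r (c - 1)) := by
          unfold pvStepV
          rw [if_pos (by exact_mod_cast hc0), e0, e1, e3, hget1self, hget1C]
          simp [pvCell]
        refine pvDone_of_set T U r c hr hc dp _ ⟨hlen, hrows, hget⟩ ?_ ?_ ?_ ?_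
        · rw [hd2, pvSet2_length, hd1, pvSet2_length]
        · intro i; rw [hd2, pvSet2_rowlen, hd1, pvSet2_rowlen]
        · intro i j hij
          rw [hd2, pvGet2_set2_ne _ _ _ _ _ _ hij, hd1, pvGet2_set2_ne _ _ _ _ _ _ hij]
        · have hbr1 : r < (pvStepH dp (r : Int) (c : Int)).size := by
            rw [hd1, pvSet2_length]; omega
          have hbc1 : c < ((pvStepH dp (r : Int) (c : Int)).getD r #[]).size := by
            rw [hd1, pvSet2_rowlen]; omega
          rw [hd2, pvGet2_set2_self _ r c _ hbr1 hbc1]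
          simp [pvCell, Nat.pos_iff_ne_zero.mp hc0]
      · have hc0' : c = 0 := by omega
        subst hc0'
        simp only [Nat.cast_zero] at hget1self hd1 ⊢
        have hd2 : pvStepV (pvStepH dp (r : Int) 0) (r : Int) 0 = pvStepH dp (r : Int) 0 := by
          unfold pvStepV
          rw [if_neg (by omega)]
        refine pvDone_of_set T U r 0 hr hc dp _ ⟨hlen, hrows, hget⟩ ?_ ?_ ?_ ?_
        · rw [hd2, hd1, pvSet2_length]
        · intro i; rw [hd2, hd1, pvSet2_rowlen]
        · intro i j hij
          rw [hd2, hd1, pvGet2_set2_ne _ _ _ _ _ _ hij]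
        · rw [hd2, hget1self]
          simp [pvCell]
    · -- r = 0 (and hence 0 < c): only the 'v > 0' write fires
      have hr0' : r = 0 := by omega
      subst hr0'
      have hc0 : 0 < c := by omega
      simp only [Nat.cast_zero] at ⊢
      have hd1 : pvStepH dp (0 : Int) (c : Int) = dp := by
        unfold pvStepH
        rw [if_neg (by omega)]
      have hB := hget 0 c hr hc
      rw [if_neg (by omega), if_neg (by omega)] at hB
      have hC := hget 0 (c - 1) hr (by omega)
      rw [if_pos (Or.inr ⟨rfl, by omega⟩)] at hC
      have hd2 : pvStepV (pvStepH dp (0 : Int) (c : Int)) (0 : Int) (c : Int) =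
          pvSet2 dp 0 c (0, pvCh 0 (c - 1)) := by
        unfold pvStepV
        rw [if_pos (by exact_mod_cast hc0), hd1, e3]
        simp only [Int.toNat_zero, e1]
        rw [hB, hC]
        rfl
      refine pvDone_of_set T U 0 c hr hc dp _ ⟨hlen, hrows, hget⟩ ?_ ?_ ?_ ?_
      · rw [hd2, pvSet2_length]
      · intro i; rw [hd2, pvSet2_rowlen]
      · intro i j hij
        rw [hd2, pvGet2_set2_ne _ _ _ _ _ _ hij]
      · have hb0 : 0 < dp.size := by omega
        have hbc : c < (dp.getD 0 #[]).size := by rw [hrows, if_pos hr]; omega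
        rw [hd2, pvGet2_set2_self dp 0 c _ hb0 hbc]
        simp [pvCell, pvCh, Nat.choose_eq_zero_of_lt hc0, Nat.pos_iff_ne_zero.mp hc0]

theorem pvDone_row_shift (T U r : Nat) (dp : Array (Array (Int × Int)))
    (hd : pvDone T U r U dp) : pvDone T U (r + 1) 0 dp := by
  obtain ⟨h1, h2, h3⟩ := hd
  refine ⟨h1, h2, ?_⟩
  intro i j hi hj
  rw [h3 i j hi hj]
  by_cases hcond : i < r ∨ (i = r ∧ j < U)
  · rw [if_pos hcond, if_pos (by omega)]
  · rw [if_neg hcond]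
    have hnc : ¬ (i < r + 1 ∨ i = r + 1 ∧ j < 0) := by omega
    rw [if_neg hnc]

theorem pvDone_inner (T U r : Nat) (hr : r < T) :
    ∀ (c : Nat), c ≤ U → ∀ dp, pvDone T U r 0 dp →
      pvDone T U r c ((List.range c).foldl
        (fun dp (k : Nat) => pvCellStep dp (r : Int) (k : Int)) dp) := by
  intro c
  induction c with
  | zero => intro _ dp h0; simpa using h0
  | succ c ih =>
    intro hc dp h0
    rw [List.range_succ, List.foldl_append]
    simp only [List.foldl_cons, List.foldl_nil]
    exact pvDone_step T U r c _ (ih (by omega) dp h0) hr (by omega)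

theorem pvDone_outer (T U : Nat) :
    ∀ (r : Nat), r ≤ T → ∀ dp, pvDone T U 0 0 dp →
      pvDone T U r 0 ((List.range r).foldl (fun dp (h : Nat) =>
        (List.range U).foldl (fun dp (k : Nat) => pvCellStep dp (h : Int) (k : Int)) dp) dp) := by
  intro r
  induction r with
  | zero => intro _ dp h0; simpa using h0
  | succ r ih =>
    intro hrT dp h0
    rw [List.range_succ, List.foldl_append]
    simp only [List.foldl_cons, List.foldl_nil]
    exact pvDone_row_shift T U r _
      (pvDone_inner T U r (by omega) U le_rfl _ (ih (by omega) dp h0))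

theorem countA_eq_choose (H V : Nat) :
    count_restricted_paths (H : Int) (V : Int) = pvCh (H + 1) V := by
  unfold count_restricted_paths
  have eH : ((H : Int) + 1) = ((H + 1 : Nat) : Int) := by push_cast; ring
  have eV : ((V : Int) + 1) = ((V + 1 : Nat) : Int) := by push_cast; ring
  simp only [eH, eV, PySem.List.pyRange_one, sub_zero, Int.toNat_natCast, List.foldl_map,
    zero_add]
  have hdone := pvDone_outer (H + 1) (V + 1) (H + 1) le_rfl _
    (pvDone_init (H + 1) (V + 1) (by omega) (by omega))
  obtain ⟨-, -, hget⟩ := hdone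
  have hHV := hget H V (by omega) (by omega)
  rw [if_pos (Or.inl (by omega))] at hHV
  rw [hHV]
  simp only [pvCell]
  simpa using pvPascal (H + 1) V (by omega)

-- B's product loop computes the binomial coefficient
theorem bfold (n : Nat) : ∀ (k : Nat), k ≤ n →
    (PySem.List.pyRange 0 (k : Int) 1).foldl
      (fun r i => PySem.Int.floordiv (r * ((n : Int) - i)) (i + 1)) 1 = pvCh n k := by
  intro k
  induction k with
  | zero => intro _; simp [PySem.List.pyRange_one_eq_nil, pvCh]
  | succ k ih =>
    intro hk
    have hk' : k ≤ n := Nat.le_of_succ_le hk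
    have hcast : ((k + 1 : Nat) : Int) = (k : Int) + 1 := by push_cast; ring
    rw [hcast, PySem.List.pyRange_one_succ_right (by positivity), List.foldl_append, ih hk']
    simp only [List.foldl_cons, List.foldl_nil]
    have h1 : (n : Int) - (k : Int) = ((n - k : Nat) : Int) := by
      push_cast [Nat.cast_sub hk']; ring
    rw [pvCh, h1]
    have h2 : ((n.choose k : Nat) : Int) * ((n - k : Nat) : Int)
        = ((n.choose k * (n - k) : Nat) : Int) := by push_cast; ring
    rw [h2, show ((k : Int) + 1) = ((k + 1 : Nat) : Int) by push_cast; ring,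
        PySem.Int.floordiv_natCast]
    rw [← Nat.choose_succ_right_eq, Nat.mul_div_cancel _ (Nat.succ_pos k)]
    rfl

theorem countB_eq_choose (H V : Nat) :
    count_restricted_paths_alt (H : Int) (V : Int) = pvCh (H + 1) V := by
  unfold count_restricted_paths_alt
  rcases Nat.lt_or_ge (H + 1) V with h | h
  · rw [if_pos (Or.inr (by exact_mod_cast h))]
    rw [pvCh, Nat.choose_eq_zero_of_lt h]
    rfl
  · rw [if_neg (by omega)]
    have := bfold (H + 1) V h
    rw [show ((H : Int) + 1) = ((H + 1 : Nat) : Int) by push_cast; ring]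
    exact this

-- ===== VERDICT (by name: the statement is the Claim_ definition above) =====
theorem count_restricted_paths_spec : Claim_equal_count_restricted_paths := by
  intro h v _ hpre
  obtain ⟨hh, hv⟩ := hpre
  unfold Spec_count_restricted_paths
  obtain ⟨H, rfl⟩ := Int.eq_ofNat_of_zero_le hh
  obtain ⟨V, rfl⟩ := Int.eq_ofNat_of_zero_le hv
  rw [countA_eq_choose, countB_eq_choose]

@[simp] theorem count_restricted_paths_raises : Claim_raises_count_restricted_paths := by
  unfold Claim_raises_count_restricted_paths
  refine ⟨?_, by decide⟩
  intro h v _ hr hp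
  unfold Raises_count_restricted_paths at hr
  unfold Pre_count_restricted_paths at hp
  omega
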